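-- pv_equiv track=rewrite | github.com/Youngini/baekjoon | baek2447_py.py | star_maker
-- ===== SOURCE A (Python) =====
-- def star_maker(n):
--     if(n==1):
--         return ['*']
--     Stars = star_maker(n//3)
--     arr = []
--     for i in Stars:
--         arr.append(i*3)
--     for i in Stars:
--         arr.append(i+" "*(n//3)+i)
--     for i in Stars:
--         arr.append(i*3)
--     return arr
-- ===== SOURCE B (Python) =====
-- def star_maker(n):
--     # chain of floor-divisions n, n//3, ..., down to the first value <= 1
--     ms = [n]
--     while ms[-1] > 1:
--         ms.append(ms[-1] // 3)
--     k = len(ms) - 1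
--     spacers = ms[1:]
--     spacers.reverse()  # innermost spacer first: ms[k], ..., ms[1]
--     rows = []
--     for r in range(3 ** k):
--         s = '*'
--         x = r
--         for sp in spacers:
--             if x % 3 == 1:
--                 s = s + ' ' * sp + s
--             else:
--                 s = s + s + s
--             x //= 3
--         rows.append(s)
--     return rows
-- ===== Notes on version B (the rewrite author's own statement) =====
-- stated objective: alternative
-- what changed: Replaces the recursive build (construct the sub-pattern once and triple/frame it at each level) with a non-recursive construction: precompute the floor-division chain of n, then build every row independently from the base-3 digits of its row index.
import Mathlib
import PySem

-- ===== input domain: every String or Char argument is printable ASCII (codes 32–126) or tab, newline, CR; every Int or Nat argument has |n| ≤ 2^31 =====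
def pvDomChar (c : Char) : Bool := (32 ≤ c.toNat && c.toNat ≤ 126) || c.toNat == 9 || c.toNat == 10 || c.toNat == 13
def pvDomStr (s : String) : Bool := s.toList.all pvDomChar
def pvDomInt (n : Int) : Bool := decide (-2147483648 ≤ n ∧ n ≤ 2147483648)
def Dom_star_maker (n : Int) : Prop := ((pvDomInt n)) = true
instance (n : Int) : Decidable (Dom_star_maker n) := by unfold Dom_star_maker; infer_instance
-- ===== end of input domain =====

-- B replaces A's recursive triple-and-frame build by a non-recursive one: precompute the
-- floor-division chain of n, then build each row independently from the base-3 digits of its index.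
-- Rows are modelled as List Char and converted to String at the boundary (String.mk).

-- ===== PORT A =====
-- fuel makes the unconditional recursion total; inside Pre_ the depth is < 64 so fuel never runs out
def starGo : Nat → Int → List (List Char)
  | 0, _ => []
  | f + 1, n =>
    if n == 1 then [['*']]
    else
      let Stars := starGo f (PySem.Int.floordiv n 3)
      -- i*3 on a string is i ++ i ++ i; " "*(n//3) is replicate (toNat matches Python: ≤0 → "")
      let arr := Stars.foldl (fun a i => a ++ [i ++ i ++ i]) ([] : List (List Char))
      let arr := Stars.foldl (fun a i => a ++ [i ++ List.replicate (PySem.Int.floordiv n 3).toNat ' ' ++ i]) arr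
      let arr := Stars.foldl (fun a i => a ++ [i ++ i ++ i]) arr
      arr

def star_maker (n : Int) : List String := (starGo 64 n).map String.mk

-- ===== PORT B =====
-- the while-loop building ms = [n, n//3, ...] until the last element is ≤ 1
def chainB (m : Int) : List Int :=
  if h : 1 < m then m :: chainB (PySem.Int.floordiv m 3) else [m]
  termination_by m.toNat
  decreasing_by
    have h3 : PySem.Int.floordiv m 3 = m / 3 := PySem.Int.floordiv_eq_ediv_of_pos (by omega)
    rw [h3]; omega

-- the inner for-loop over spacers, state (s, x)
def rowStep (st : List Char × Int) (sp : Int) : List Char × Int :=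
  (if PySem.Int.mod st.2 3 == 1 then st.1 ++ List.replicate sp.toNat ' ' ++ st.1
   else st.1 ++ st.1 ++ st.1,
   PySem.Int.floordiv st.2 3)

def buildRow (spacers : List Int) (r : Int) : List Char :=
  (spacers.foldl rowStep (['*'], r)).1

def star_maker_alt (n : Int) : List String :=
  let ms := chainB n
  let k := ms.length - 1
  let spacers := (ms.drop 1).reverse    -- ms[1:] then .reverse()
  (PySem.List.pyRange 0 ((3 : Int) ^ k) 1).map (fun r => String.mk (buildRow spacers r))

-- ===== PRECONDITION & SPEC =====
-- A returns exactly when the chain n, n//3, n//9, … hits 1, i.e. 3^k ≤ n < 2·3^k for some k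
-- (within Dom, k < 20 suffices); on all other n the Python A recurses forever (RecursionError).
def Pre_star_maker (n : Int) : Prop := ∃ k : Nat, k < 20 ∧ (3 : Int) ^ k ≤ n ∧ n < 2 * 3 ^ k
instance (n : Int) : Decidable (Pre_star_maker n) := by unfold Pre_star_maker; infer_instance
def pvWitness_star_maker : Int := 9

def Spec_star_maker (n : Int) (out : List String) : Prop := out = star_maker_alt n
instance (n : Int) (out : List String) : Decidable (Spec_star_maker n out) := by unfold Spec_star_maker; infer_instance

-- ===== CLAIM (what is proved, stated in full; the proofs are below) =====
def Claim_equal_star_maker : Prop := ∀ (n : Int), Dom_star_maker n → Pre_star_maker n → Spec_star_maker n (star_maker n)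

-- ===== LEMMAS AND PROOFS =====

-- append-accumulator loop is init ++ map
theorem foldl_append_singleton {α β : Type} (g : α → β) (l : List α) (init : List β) :
    l.foldl (fun a i => a ++ [g i]) init = init ++ l.map g := by
  induction l generalizing init with
  | nil => simp
  | cons x xs ih => simp [List.foldl_cons, ih, List.append_assoc]

theorem chainB_head (m : Int) : ∃ t, chainB m = m :: t := by
  rw [chainB]; split <;> exact ⟨_, rfl⟩

-- band transfer: 3^(k+1) ≤ n < 2·3^(k+1) → 3^k ≤ n//3 < 2·3^k
theorem band_div (k : Nat) (n : Int) (h1 : (3:Int) ^ (k+1) ≤ n) (h2 : n < 2 * 3 ^ (k+1)) :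
    (3:Int) ^ k ≤ PySem.Int.floordiv n 3 ∧ PySem.Int.floordiv n 3 < 2 * 3 ^ k := by
  have h3 : PySem.Int.floordiv n 3 = n / 3 := PySem.Int.floordiv_eq_ediv_of_pos (by omega)
  have hp : ((3:Int) ^ (k+1)) = 3 * 3 ^ k := by ring
  rw [h3]
  rw [hp] at h1 h2
  have hq : 3 * (n / 3) + n % 3 = n := Int.mul_ediv_add_emod n 3
  have hm0 : 0 ≤ n % 3 := Int.emod_nonneg n (by omega)
  have hm1 : n % 3 < 3 := Int.emod_lt_of_pos n (by omega)
  constructor <;> nlinarith [hq, hm0, hm1]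

-- second component of the row fold is x // 3^len; splitting off the high digit
theorem foldl_rowStep_split (sp : List Int) (s0 : List Char) (y x : Int)
    (hx0 : 0 ≤ x) (hx : x < (3:Int) ^ sp.length) :
    sp.foldl rowStep (s0, y * 3 ^ sp.length + x) =
      ((sp.foldl rowStep (s0, x)).1, y) := by
  induction sp generalizing s0 y x with
  | nil =>
    simp only [List.length_nil, pow_zero] at hx ⊢
    have : x = 0 := by omega
    simp [this]
  | cons a t ih =>
    simp only [List.length_cons] at hx ⊢
    have hpow : (3:Int) ^ (t.length + 1) = 3 * 3 ^ t.length := by ring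
    set q : Int := y * 3 ^ t.length with hq
    have hlin : y * 3 ^ (t.length + 1) + x = 3 * q + x := by rw [hq]; ring
    have hmod : PySem.Int.mod (y * 3 ^ (t.length + 1) + x) 3 = PySem.Int.mod x 3 := by
      rw [PySem.Int.mod_eq_emod_of_pos (by omega), PySem.Int.mod_eq_emod_of_pos (b := 3) (by omega), hlin]
      omega
    have hdiv : PySem.Int.floordiv (y * 3 ^ (t.length + 1) + x) 3 = q + PySem.Int.floordiv x 3 := by
      rw [PySem.Int.floordiv_eq_ediv_of_pos (by omega), PySem.Int.floordiv_eq_ediv_of_pos (b := 3) (by omega), hlin]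
      omega
    have hx3 : PySem.Int.floordiv x 3 = x / 3 := PySem.Int.floordiv_eq_ediv_of_pos (by omega)
    have hlt : PySem.Int.floordiv x 3 < 3 ^ t.length := by
      rw [hx3]; rw [hpow] at hx; omega
    have hge : 0 ≤ PySem.Int.floordiv x 3 := by rw [hx3]; omega
    have hstep : rowStep (s0, y * 3 ^ (t.length + 1) + x) a =
        ((rowStep (s0, x) a).1, q + PySem.Int.floordiv x 3) := by
      simp only [rowStep, hmod, hdiv]
    rw [List.foldl_cons, List.foldl_cons, hstep]
    rw [ih _ y (PySem.Int.floordiv x 3) hge hlt]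
    rw [show ((rowStep (s0, x) a).1, PySem.Int.floordiv x 3) = rowStep (s0, x) a from rfl]

-- chain under the band hypothesis: length, and the spacers decomposition
theorem chainB_band_len (k : Nat) : ∀ n : Int, (3:Int) ^ k ≤ n → n < 2 * 3 ^ k →
    (chainB n).length = k + 1 := by
  induction k with
  | zero =>
    intro n h1 h2
    have : n = 1 := by simp only [pow_zero] at h1 h2; omega
    subst this
    rw [chainB]; simp
  | succ k ih =>
    intro n h1 h2
    have hn1 : 1 < n := by
      have : (3:Int) ≤ 3 ^ (k+1) := by
        calc (3:Int) = 3 ^ 1 := by ring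
        _ ≤ 3 ^ (k+1) := by exact pow_le_pow_right₀ (by omega) (by omega)
      omega
    rw [chainB, dif_pos hn1]
    obtain ⟨hb1, hb2⟩ := band_div k n h1 h2
    simp only [List.length_cons]
    rw [ih _ hb1 hb2]

theorem chainB_spacers_succ (k : Nat) (n : Int) (h1 : (3:Int) ^ (k+1) ≤ n) (h2 : n < 2 * 3 ^ (k+1)) :
    ((chainB n).drop 1).reverse =
      ((chainB (PySem.Int.floordiv n 3)).drop 1).reverse ++ [PySem.Int.floordiv n 3] := by
  have hn1 : 1 < n := by
    have : (3:Int) ≤ 3 ^ (k+1) := by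
      calc (3:Int) = 3 ^ 1 := by ring
      _ ≤ 3 ^ (k+1) := by exact pow_le_pow_right₀ (by omega) (by omega)
    omega
  rw [chainB, dif_pos hn1]
  obtain ⟨t, ht⟩ := chainB_head (PySem.Int.floordiv n 3)
  rw [ht]
  simp only [List.drop_succ_cons, List.drop_zero, List.reverse_cons]

-- length of spacers = k under the band hypothesis
theorem spacers_len (k : Nat) (n : Int) (h1 : (3:Int) ^ k ≤ n) (h2 : n < 2 * 3 ^ k) :
    ((chainB n).drop 1).reverse.length = k := by
  have := chainB_band_len k n h1 h2
  simp [this]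

-- MAIN: A's recursion equals B's per-row digit construction, on the band of k
theorem main_lemma (k : Nat) : ∀ (f : Nat) (n : Int), k < f →
    (3:Int) ^ k ≤ n → n < 2 * 3 ^ k →
    starGo f n = (List.range (3 ^ k)).map (fun r : Nat => buildRow ((chainB n).drop 1).reverse (r : Int)) := by
  induction k with
  | zero =>
    intro f n hf h1 h2
    have hn : n = 1 := by simp only [pow_zero] at h1 h2; omega
    subst hn
    obtain ⟨f', rfl⟩ : ∃ f', f = f' + 1 := ⟨f - 1, by omega⟩
    have hc : chainB (1:Int) = [1] := by rw [chainB]; norm_num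
    rw [starGo, hc]
    norm_num [buildRow, List.range_succ]
  | succ k ih =>
    intro f n hf h1 h2
    obtain ⟨f', rfl⟩ : ∃ f', f = f' + 1 := ⟨f - 1, by omega⟩
    have hn1 : 1 < n := by
      have : (3:Int) ≤ 3 ^ (k+1) := by
        calc (3:Int) = 3 ^ 1 := by ring
        _ ≤ 3 ^ (k+1) := by exact pow_le_pow_right₀ (by omega) (by omega)
      omega
    obtain ⟨hb1, hb2⟩ := band_div k n h1 h2
    set m := PySem.Int.floordiv n 3 with hm
    have hStars := ih f' m (by omega) hb1 hb2
    have hne1 : (n == 1) = false := by simp; omega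
    rw [starGo, hne1]
    simp only [Bool.false_eq_true, if_false]
    rw [hStars]
    rw [foldl_append_singleton, foldl_append_singleton, foldl_append_singleton]
    simp only [List.nil_append, List.append_assoc, List.map_map]
    -- RHS: split range (3^(k+1)) into three bands
    rw [chainB_spacers_succ k n h1 h2, ← hm]
    set sp := ((chainB m).drop 1).reverse with hsp
    have hsplen : sp.length = k := spacers_len k m hb1 hb2
    have hrange : List.range (3 ^ (k+1)) =
        List.range (3 ^ k) ++ (List.range (3 ^ k)).map (fun r => 3 ^ k + r)
          ++ (List.range (3 ^ k)).map (fun r => 2 * 3 ^ k + r) := by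
      have e1 : 3 ^ (k+1) = 3 ^ k + (3 ^ k + 3 ^ k) := by ring
      have h23 : (List.range (3 ^ k)).map ((fun x => 3 ^ k + x) ∘ fun x => 3 ^ k + x)
          = (List.range (3 ^ k)).map (fun r => 2 * 3 ^ k + r) :=
        List.map_congr_left (fun r _ => by simp [Function.comp_def]; ring)
      rw [e1, List.range_add, List.range_add, List.map_append, List.map_map, List.append_assoc, h23]
    rw [hrange]
    simp only [List.map_append, List.map_map, List.append_assoc]
    -- band b: buildRow (sp ++ [m]) (b*3^k + r) computed via foldl_rowStep_split
    have hband : ∀ (b : Nat) (r : Nat), b < 3 → r < 3 ^ k →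
        buildRow (sp ++ [m]) ((b * 3 ^ k + r : Nat) : Int) =
          (if (b == 1) = true then
            buildRow sp (r : Int) ++ List.replicate m.toNat ' ' ++ buildRow sp (r : Int)
          else buildRow sp (r : Int) ++ buildRow sp (r : Int) ++ buildRow sp (r : Int)) := by
      intro b r hb hr
      have hcast : ((b * 3 ^ k + r : Nat) : Int) = (b : Int) * 3 ^ sp.length + (r : Int) := by
        push_cast [hsplen]; ring
      have hb3 : (b : Int) < 3 := by exact_mod_cast hb
      have hmod : PySem.Int.mod (b : Int) 3 = (b : Int) := by
        rw [PySem.Int.mod_eq_emod_of_pos (by omega)]; omega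
      have hproj : buildRow (sp ++ [m]) ((b * 3 ^ k + r : Nat) : Int)
          = (rowStep (buildRow sp (r : Int), (b : Int)) m).1 := by
        unfold buildRow
        rw [hcast, List.foldl_append,
          foldl_rowStep_split sp ['*'] (b : Int) (r : Int) (by positivity)
            (by rw [hsplen]; exact_mod_cast hr)]
        rfl
      rw [hproj]
      by_cases hb1 : b = 1
      · subst hb1
        have hmod1 : PySem.Int.mod (1 : Int) 3 = 1 := by decide
        simp only [rowStep, Nat.cast_one, hmod1, beq_self_eq_true, if_true,
          show ((1:Nat) == 1) = true from rfl]
      · have hbne : ¬ ((b : Int) = 1) := by exact_mod_cast hb1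
        have e1 : (((b : Int)) == 1) = false := by simpa using hbne
        have e2 : (b == 1) = false := by simpa using hb1
        simp only [rowStep, hmod, e1, e2, Bool.false_eq_true, if_false]
    -- finish: three bands pointwise
    congr 1
    · apply List.map_congr_left
      intro r hr
      rw [List.mem_range] at hr
      have h0 := hband 0 r (by omega) hr
      simp only [show ((0:Nat) == 1) = false from rfl, Bool.false_eq_true, if_false,
        Nat.zero_mul, Nat.zero_add, List.append_assoc] at h0
      simp only [Function.comp_apply, List.append_assoc]
      exact h0.symm
    congr 1
    · apply List.map_congr_left
      intro r hr
      rw [List.mem_range] at hr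
      have h1' := hband 1 r (by omega) hr
      simp only [show ((1:Nat) == 1) = true from rfl, if_true, Nat.one_mul,
        List.append_assoc] at h1'
      simp only [Function.comp_apply, List.append_assoc]
      exact h1'.symm
    · apply List.map_congr_left
      intro r hr
      rw [List.mem_range] at hr
      have h2' := hband 2 r (by omega) hr
      simp only [show ((2:Nat) == 1) = false from rfl, Bool.false_eq_true, if_false,
        List.append_assoc] at h2'
      simp only [Function.comp_apply, List.append_assoc]
      exact h2'.symm

-- pyRange 0 N 1 over a Nat power is List.range
theorem pyRange_pow (k : Nat) :
    PySem.List.pyRange 0 ((3:Int) ^ k) 1 = (List.range (3 ^ k)).map (fun r : Nat => (r : Int)) := by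
  rw [PySem.List.pyRange_one]
  have h1 : ((3:Int) ^ k - 0) = ((3 ^ k : Nat) : Int) := by push_cast; ring
  rw [h1, Int.toNat_natCast]
  exact List.map_congr_left (fun r _ => by omega)

-- ===== VERDICT (by name: the statement is the Claim_ definition above) =====
theorem star_maker_spec : Claim_equal_star_maker := by
  intro n _ hpre
  obtain ⟨k, hk, h1, h2⟩ := hpre
  unfold Spec_star_maker star_maker star_maker_alt
  have hlen := chainB_band_len k n h1 h2
  rw [main_lemma k 64 n (by omega) h1 h2]
  simp only [hlen]
  rw [show k + 1 - 1 = k from rfl]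
  rw [pyRange_pow k]
  simp [List.map_map, Function.comp_def]
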